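-- pv_equiv track=rewrite | github.com/mohdasti/xr-adaptive-modality-2025 | scripts/generate_participant_tracking.py | generate_tracking_data
-- ===== SOURCE A (Python) =====
-- from typing import List, Tuple
--
-- WILLIAMS_SEQUENCES = [
--     ['HaS_P0', 'GaS_P0', 'HaA_P0', 'GaA_P0', 'HaS_P1', 'GaS_P1', 'HaA_P1', 'GaA_P1'],
--     ['GaS_P0', 'HaA_P0', 'GaA_P0', 'HaS_P0', 'GaS_P1', 'HaA_P1', 'GaA_P1', 'HaS_P1'],
--     ['HaA_P0', 'GaA_P0', 'HaS_P0', 'GaS_P0', 'HaA_P1', 'GaA_P1', 'HaS_P1', 'GaS_P1'],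
--     ['GaA_P0', 'HaS_P0', 'GaS_P0', 'HaA_P0', 'GaA_P1', 'HaS_P1', 'GaS_P1', 'HaA_P1'],
--     ['HaS_P1', 'GaS_P1', 'HaA_P1', 'GaA_P1', 'HaS_P0', 'GaS_P0', 'HaA_P0', 'GaA_P0'],
--     ['GaS_P1', 'HaA_P1', 'GaA_P1', 'HaS_P1', 'GaS_P0', 'HaA_P0', 'GaA_P0', 'HaS_P0'],
--     ['HaA_P1', 'GaA_P1', 'HaS_P1', 'GaS_P1', 'HaA_P0', 'GaA_P0', 'HaS_P0', 'GaS_P0'],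
--     ['GaA_P1', 'HaS_P1', 'GaS_P1', 'HaA_P1', 'GaA_P0', 'HaS_P0', 'GaS_P0', 'HaA_P0'],
-- ]
--
-- def get_sequence_for_participant(participant_index: int) -> List[str]:
--     """Get Williams design sequence for a participant index (0-99)"""
--     sequence_index = participant_index % len(WILLIAMS_SEQUENCES)
--     return WILLIAMS_SEQUENCES[sequence_index]
--
-- def generate_tracking_data(
--     num_participants: int,
--     num_sessions: int,
--     blocks_per_session: int = None
-- ) -> List[Tuple[str, int, int, str]]:
--     """
--     Generate tracking data for all participants
--
--     Returns list of (participant_id, session_number, block_number, block_condition)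
--     """
--     data = []
--
--     for participant_idx in range(num_participants):
--         participant_id = f"P{participant_idx + 1:03d}"  # P001, P002, etc.
--         sequence = get_sequence_for_participant(participant_idx)
--
--         # Determine blocks per session
--         total_blocks = len(sequence)  # 8 blocks total
--         if blocks_per_session is None:
--             # Distribute blocks evenly across sessions
--             blocks_per_session = total_blocks // num_sessions
--             if total_blocks % num_sessions != 0:
--                 blocks_per_session += 1
--
--         block_counter = 0
--         for session_num in range(1, num_sessions + 1):
--             for block_in_session in range(1, blocks_per_session + 1):
--                 if block_counter >= total_blocks:
--                     break
--
--                 block_number = block_counter + 1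
--                 block_condition = sequence[block_counter]
--
--                 data.append((
--                     participant_id,
--                     session_num,
--                     block_number,
--                     block_condition
--                 ))
--
--                 block_counter += 1
--
--             if block_counter >= total_blocks:
--                 break
--
--     return data
-- ===== SOURCE B (Python) =====
-- from typing import List, Tuple
--
-- WILLIAMS_SEQUENCES = [
--     ['HaS_P0', 'GaS_P0', 'HaA_P0', 'GaA_P0', 'HaS_P1', 'GaS_P1', 'HaA_P1', 'GaA_P1'],
--     ['GaS_P0', 'HaA_P0', 'GaA_P0', 'HaS_P0', 'GaS_P1', 'HaA_P1', 'GaA_P1', 'HaS_P1'],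
--     ['HaA_P0', 'GaA_P0', 'HaS_P0', 'GaS_P0', 'HaA_P1', 'GaA_P1', 'HaS_P1', 'GaS_P1'],
--     ['GaA_P0', 'HaS_P0', 'GaS_P0', 'HaA_P0', 'GaA_P1', 'HaS_P1', 'GaS_P1', 'HaA_P1'],
--     ['HaS_P1', 'GaS_P1', 'HaA_P1', 'GaA_P1', 'HaS_P0', 'GaS_P0', 'HaA_P0', 'GaA_P0'],
--     ['GaS_P1', 'HaA_P1', 'GaA_P1', 'HaS_P1', 'GaS_P0', 'HaA_P0', 'GaA_P0', 'HaS_P0'],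
--     ['HaA_P1', 'GaA_P1', 'HaS_P1', 'GaS_P1', 'HaA_P0', 'GaA_P0', 'HaS_P0', 'GaS_P0'],
--     ['GaA_P1', 'HaS_P1', 'GaS_P1', 'HaA_P1', 'GaA_P0', 'HaS_P0', 'GaS_P0', 'HaA_P0'],
-- ]
--
-- def get_sequence_for_participant(participant_index: int) -> List[str]:
--     return WILLIAMS_SEQUENCES[participant_index % len(WILLIAMS_SEQUENCES)]
--
-- def generate_tracking_data(
--     num_participants: int,
--     num_sessions: int,
--     blocks_per_session: int = None
-- ) -> List[Tuple[str, int, int, str]]: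
--     """Flat re-implementation: one pass over block indices per participant;
--     the session number is computed in closed form as b // blocks_per_session + 1."""
--     data = []
--     for p in range(num_participants):
--         pid = f"P{p + 1:03d}"
--         seq = get_sequence_for_participant(p)
--         total = len(seq)
--         bps = blocks_per_session
--         if bps is None:
--             bps = total // num_sessions + (1 if total % num_sessions else 0)
--         limit = min(total, max(0, num_sessions) * max(0, bps))
--         data.extend((pid, b // bps + 1, b + 1, seq[b]) for b in range(limit))
--     return data
-- ===== Notes on version B (the rewrite author's own statement) =====
-- stated objective: simpler
-- what changed: The nested session/block loops with a counter and two break statements are replaced by a single flat pass over block indices b in range(min(total, max(0,num_sessions)*max(0,bps))) with the session number computed in closed form as b // bps + 1.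
import Mathlib
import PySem

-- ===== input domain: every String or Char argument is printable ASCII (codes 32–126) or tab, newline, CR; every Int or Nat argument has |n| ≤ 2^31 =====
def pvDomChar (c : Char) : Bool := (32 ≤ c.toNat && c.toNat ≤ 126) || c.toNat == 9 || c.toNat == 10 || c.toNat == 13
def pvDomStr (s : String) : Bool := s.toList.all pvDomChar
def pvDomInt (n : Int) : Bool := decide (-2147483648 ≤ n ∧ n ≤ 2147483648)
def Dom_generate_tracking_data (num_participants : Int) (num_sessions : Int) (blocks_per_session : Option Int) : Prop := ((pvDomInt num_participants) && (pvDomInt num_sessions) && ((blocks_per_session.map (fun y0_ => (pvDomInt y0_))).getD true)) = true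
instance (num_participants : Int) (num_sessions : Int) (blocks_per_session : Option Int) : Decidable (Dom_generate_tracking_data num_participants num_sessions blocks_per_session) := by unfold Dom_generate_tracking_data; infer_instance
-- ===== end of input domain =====

-- B replaces A's nested session/block loops (counter + two breaks) by one flat pass over
-- block indices with the session number computed in closed form (objective: simpler).

-- ===== PORT A =====
def pvWilliams : List (List String) := [
  ["HaS_P0", "GaS_P0", "HaA_P0", "GaA_P0", "HaS_P1", "GaS_P1", "HaA_P1", "GaA_P1"],
  ["GaS_P0", "HaA_P0", "GaA_P0", "HaS_P0", "GaS_P1", "HaA_P1", "GaA_P1", "HaS_P1"],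
  ["HaA_P0", "GaA_P0", "HaS_P0", "GaS_P0", "HaA_P1", "GaA_P1", "HaS_P1", "GaS_P1"],
  ["GaA_P0", "HaS_P0", "GaS_P0", "HaA_P0", "GaA_P1", "HaS_P1", "GaS_P1", "HaA_P1"],
  ["HaS_P1", "GaS_P1", "HaA_P1", "GaA_P1", "HaS_P0", "GaS_P0", "HaA_P0", "GaA_P0"],
  ["GaS_P1", "HaA_P1", "GaA_P1", "HaS_P1", "GaS_P0", "HaA_P0", "GaA_P0", "HaS_P0"],
  ["HaA_P1", "GaA_P1", "HaS_P1", "GaS_P1", "HaA_P0", "GaA_P0", "HaS_P0", "GaS_P0"],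
  ["GaA_P1", "HaS_P1", "GaS_P1", "HaA_P1", "GaA_P0", "HaS_P0", "GaS_P0", "HaA_P0"]]

-- WILLIAMS_SEQUENCES[participant_index % len(WILLIAMS_SEQUENCES)]; the index is always in
-- range (Python % with positive divisor), so .getD [] is never reached.
def get_sequence_for_participant (participant_index : Int) : List String :=
  (PySem.List.pyGet? pvWilliams (PySem.Int.mod participant_index (PySem.List.len pvWilliams))).getD []

-- f"P{n:03d}" for n ≥ 1 (the only values both Pythons format)
def pvPid (p : Int) : String :=
  let s := PySem.Int.toChars (p + 1)
  String.ofList ('P' :: (List.replicate (3 - s.length) '0' ++ s))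

-- inner `for block_in_session in range(1, blocks_per_session+1)` with its break;
-- the loop variable is unused, so the iteration is by remaining count (Python's range is
-- lazy: the break must stop the recursion without materialising the range)
def pvA_blocks : Nat → Int → List String → String → Int → Int →
    List (String × Int × Int × String) → List (String × Int × Int × String) × Int
  | 0, _, _, _, _, counter, acc => (acc, counter)
  | n + 1, total, seq, pid, s, counter, acc =>
    if counter ≥ total then (acc, counter)
    else pvA_blocks n total seq pid s (counter + 1)
      (acc ++ [(pid, s, counter + 1, (PySem.List.pyGet? seq counter).getD "")])

-- outer `for session_num in range(1, num_sessions+1)` with its trailing break: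
-- remaining-count recursion carrying the current session number s
def pvA_sessions : Nat → Int → Int → Int → List String → String → Int →
    List (String × Int × Int × String) → List (String × Int × Int × String) × Int
  | 0, _, _, _, _, _, counter, acc => (acc, counter)
  | m + 1, s, bps, total, seq, pid, counter, acc =>
    let r := pvA_blocks (bps + 1 - 1).toNat total seq pid s counter acc
    if r.2 ≥ total then r
    else pvA_sessions m (s + 1) bps total seq pid r.2 r.1

-- `for participant_idx in range(num_participants)` (count + running index);
-- blocks_per_session is a mutable local of the whole function, threaded as an Option
-- that becomes `some` after the first computation
def pvA_participants : Nat → Int → Int → Option Int →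
    List (String × Int × Int × String) → List (String × Int × Int × String)
  | 0, _, _, _, data => data
  | n + 1, p, ns, bpsOpt, data =>
    let pid := pvPid p
    let seq := get_sequence_for_participant p
    let total := PySem.List.len seq
    let bps : Int := match bpsOpt with
      | some b => b
      | none => PySem.Int.floordiv total ns + (if PySem.Int.mod total ns ≠ 0 then 1 else 0)
    let r := pvA_sessions (ns + 1 - 1).toNat 1 bps total seq pid 0 data
    pvA_participants n (p + 1) ns (some bps) r.1

def generate_tracking_data (num_participants : Int) (num_sessions : Int)
    (blocks_per_session : Option Int) : List (String × Int × Int × String) :=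
  pvA_participants num_participants.toNat 0 num_sessions blocks_per_session []

-- ===== PORT B =====
-- body of B's single participant loop: one flat pass over block indices
def pvB_body (ns : Int) (bpso : Option Int) (p : Int) : List (String × Int × Int × String) :=
  let pid := pvPid p
  let seq := get_sequence_for_participant p
  let total := PySem.List.len seq
  let bps : Int := match bpso with
    | some b => b
    | none => PySem.Int.floordiv total ns + (if PySem.Int.mod total ns ≠ 0 then 1 else 0)
  let limit := min total (max 0 ns * max 0 bps)
  (PySem.List.pyRange 0 limit 1).map
    (fun b => (pid, PySem.Int.floordiv b bps + 1, b + 1, (PySem.List.pyGet? seq b).getD ""))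

def generate_tracking_data_alt (num_participants : Int) (num_sessions : Int)
    (blocks_per_session : Option Int) : List (String × Int × Int × String) :=
  (PySem.List.pyRange 0 num_participants 1).flatMap (pvB_body num_sessions blocks_per_session)

-- ===== PRECONDITION & SPEC =====
-- Pre_ excludes exactly the inputs where A raises ZeroDivisionError (blocks_per_session is
-- None, num_sessions == 0 and the participant loop body runs); B raises there too.
def Pre_generate_tracking_data (num_participants : Int) (num_sessions : Int) (blocks_per_session : Option Int) : Prop :=
  num_participants ≤ 0 ∨ blocks_per_session ≠ none ∨ num_sessions ≠ 0
instance (num_participants : Int) (num_sessions : Int) (blocks_per_session : Option Int) : Decidable (Pre_generate_tracking_data num_participants num_sessions blocks_per_session) := by unfold Pre_generate_tracking_data; infer_instance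

def pvWitness_generate_tracking_data : Int × Int × Option Int := (3, 2, none)

def Spec_generate_tracking_data (num_participants : Int) (num_sessions : Int) (blocks_per_session : Option Int) (out : List (String × Int × Int × String)) : Prop := out = generate_tracking_data_alt num_participants num_sessions blocks_per_session
instance (num_participants : Int) (num_sessions : Int) (blocks_per_session : Option Int) (out : List (String × Int × Int × String)) : Decidable (Spec_generate_tracking_data num_participants num_sessions blocks_per_session out) := by unfold Spec_generate_tracking_data; infer_instance

-- ===== CLAIM (what is proved, stated in full; the proofs are below) =====
def Claim_equal_generate_tracking_data : Prop := ∀ (num_participants : Int) (num_sessions : Int) (blocks_per_session : Option Int), Dom_generate_tracking_data num_participants num_sessions blocks_per_session → Pre_generate_tracking_data num_participants num_sessions blocks_per_session → Spec_generate_tracking_data num_participants num_sessions blocks_per_session (generate_tracking_data num_participants num_sessions blocks_per_session)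

-- ===== LEMMAS AND PROOFS =====

-- every Williams sequence has 8 blocks
lemma pv_seqlen (p : Int) : (get_sequence_for_participant p).length = 8 := by
  unfold get_sequence_for_participant
  have h8 : PySem.List.len pvWilliams = 8 := by decide
  rw [h8]
  have h0 : 0 ≤ PySem.Int.mod p 8 := PySem.Int.mod_nonneg p (by norm_num)
  have h1 : PySem.Int.mod p 8 < 8 := PySem.Int.mod_lt p (by norm_num)
  rw [PySem.List.pyGet?_of_nonneg (h := h0)]
  have hi : (PySem.Int.mod p 8).toNat < 8 := by omega
  set i := (PySem.Int.mod p 8).toNat with hidef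
  clear_value i
  interval_cases i <;> rfl

-- inner loop: starting at counter c ≤ len seq, n remaining iterations append
-- the blocks with indices [c, min (c+n) (len seq)) and stop there
lemma pv_blocks_eq (n : Nat) (seq : List String) (pid : String) (s : Int)
    (c : Nat) (acc : List (String × Int × Int × String)) (hc : c ≤ seq.length) :
    pvA_blocks n (seq.length : Int) seq pid s (c : Int) acc
    = (acc ++ (List.range' c (min (c + n) seq.length - c)).map
        (fun (k : Nat) => (pid, s, (k : Int) + 1, seq.getD k "")),
       ((min (c + n) seq.length : Nat) : Int)) := by
  induction n generalizing c acc with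
  | zero =>
    simp [pvA_blocks, Nat.min_eq_left hc]
  | succ n ih =>
    by_cases hge : (c : Int) ≥ (seq.length : Int)
    · have hce : c = seq.length := by omega
      simp [pvA_blocks, hce]
    · have hlt : c < seq.length := by omega
      rw [pvA_blocks]
      simp only [hge, if_false]
      have hcast : (c : Int) + 1 = ((c + 1 : Nat) : Int) := by push_cast; ring
      rw [hcast, ih (c + 1) _ (by omega)]
      rw [Prod.mk.injEq]
      refine ⟨?_, ?_⟩
      · rw [List.append_assoc]
        congr 1
        have hr : List.range' c (min (c + (n + 1)) seq.length - c)
            = c :: List.range' (c + 1) (min ((c + 1) + n) seq.length - (c + 1)) := by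
          have : min (c + (n + 1)) seq.length - c
              = (min ((c + 1) + n) seq.length - (c + 1)) + 1 := by omega
          rw [this, List.range'_succ]
        rw [hr, List.map_cons, List.singleton_append]
        rw [PySem.List.pyGet?_natCast, List.getD_eq_getElem?_getD, hcast]
      · congr 1
        omega

-- outer loop: m remaining sessions, current session number j ≥ 1, counter (j-1)*bpn
lemma pv_sessions_eq (seq : List String) (pid : String) (bps : Int)
    (m j : Nat) (acc : List (String × Int × Int × String)) (hj : 1 ≤ j)
    (hc : (j - 1) * bps.toNat ≤ seq.length) :
    pvA_sessions m (j : Int) bps (seq.length : Int) seq pid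
      (((j - 1) * bps.toNat : Nat) : Int) acc
    = (acc ++ (List.range' ((j - 1) * bps.toNat)
          (min ((j - 1 + m) * bps.toNat) seq.length - (j - 1) * bps.toNat)).map
        (fun (k : Nat) => (pid, ((k / bps.toNat : Nat) : Int) + 1, (k : Int) + 1, seq.getD k "")),
       ((min ((j - 1 + m) * bps.toNat) seq.length : Nat) : Int)) := by
  induction m generalizing j acc with
  | zero =>
    simp [pvA_sessions, Nat.min_eq_left hc]
  | succ m ihm =>
    have hj1 : j - 1 + 1 = j := Nat.succ_pred_eq_of_pos hj
    have hjb : (j - 1) * bps.toNat + bps.toNat = j * bps.toNat := by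
      calc (j - 1) * bps.toNat + bps.toNat = (j - 1 + 1) * bps.toNat := by ring
        _ = j * bps.toNat := by rw [hj1]
    rw [pvA_sessions]
    have hlen : (bps + 1 - 1).toNat = bps.toNat := by omega
    have hb := pv_blocks_eq (bps + 1 - 1).toNat seq pid (j : Int)
      ((j - 1) * bps.toNat) acc hc
    rw [hlen, hjb] at hb
    rw [hlen, hb]
    simp only []
    -- the congruence between the constant session number ↑j and the closed form k / bpn + 1
    have hcongr : ∀ N, N ≤ j * bps.toNat → N ≤ seq.length →
        (List.range' ((j - 1) * bps.toNat) (N - (j - 1) * bps.toNat)).map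
          (fun (k : Nat) => (pid, (j : Int), (k : Int) + 1, seq.getD k ""))
        = (List.range' ((j - 1) * bps.toNat) (N - (j - 1) * bps.toNat)).map
          (fun (k : Nat) => (pid, ((k / bps.toNat : Nat) : Int) + 1, (k : Int) + 1, seq.getD k "")) := by
      intro N hN _
      apply List.map_congr_left
      intro k hk
      obtain ⟨hk1, hk2⟩ := List.mem_range'_1.mp hk
      have hkdiv : k / bps.toNat = j - 1 := by
        apply Nat.div_eq_of_lt_le
        · exact hk1
        · rw [hj1, ← hjb] at *; omega
      rw [hkdiv]
      have : ((j - 1 : Nat) : Int) + 1 = (j : Int) := by omega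
      rw [this]
    by_cases hbreak : seq.length ≤ j * bps.toNat
    · have hmin1 : min (j * bps.toNat) seq.length = seq.length := Nat.min_eq_right hbreak
      have hmin2 : min ((j - 1 + (m + 1)) * bps.toNat) seq.length = seq.length := by
        apply Nat.min_eq_right
        calc seq.length ≤ j * bps.toNat := hbreak
          _ ≤ (j - 1 + (m + 1)) * bps.toNat := Nat.mul_le_mul_right _ (by omega)
      rw [hmin1, hmin2, if_pos (by exact_mod_cast le_refl _)]
      rw [hcongr seq.length hbreak le_rfl]
    · have hlt : j * bps.toNat < seq.length := by omega
      have hmin1 : min (j * bps.toNat) seq.length = j * bps.toNat := Nat.min_eq_left (le_of_lt hlt)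
      rw [hmin1, if_neg (by exact_mod_cast not_le.mpr hlt)]
      have hjcast : (j : Int) + 1 = ((j + 1 : Nat) : Int) := by push_cast; ring
      have ihm' := ihm (j + 1)
        (acc ++ (List.range' ((j - 1) * bps.toNat) (j * bps.toNat - (j - 1) * bps.toNat)).map
          (fun (k : Nat) => (pid, (j : Int), (k : Int) + 1, seq.getD k "")))
        (by omega) (by simpa using le_of_lt hlt)
      simp only [Nat.add_sub_cancel] at ihm'
      rw [hjcast, ihm']
      have hNbig : j * bps.toNat ≤ min ((j + m) * bps.toNat) seq.length := by
        refine le_min ?_ (le_of_lt hlt)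
        exact Nat.mul_le_mul_right _ (by omega)
      rw [Prod.mk.injEq]
      refine ⟨?_, ?_⟩
      · rw [hcongr (j * bps.toNat) le_rfl (le_of_lt hlt), List.append_assoc, ← List.map_append]
        congr 1
        have h2 : j - 1 + (m + 1) = j + m := by omega
        rw [h2]
        have h1 : (j - 1) * bps.toNat ≤ j * bps.toNat :=
          Nat.mul_le_mul_right _ (by omega)
        have key := List.range'_append_1 (s := (j - 1) * bps.toNat)
          (m := j * bps.toNat - (j - 1) * bps.toNat)
          (n := min ((j + m) * bps.toNat) seq.length - j * bps.toNat)
        rw [show (j - 1) * bps.toNat + (j * bps.toNat - (j - 1) * bps.toNat) = j * bps.toNat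
          from by omega] at key
        rw [key]
        have harith : ∀ (A B X : Nat), A ≤ B → B ≤ X → B - A + (X - B) = X - A := by
          intro A B X hab hbx; omega
        rw [harith _ _ _ h1 hNbig]
      · congr 1
        have h2 : j - 1 + (m + 1) = j + m := by omega
        rw [h2]

-- per participant: A's nested loops produce exactly B's flat pass
lemma pv_part_eq (seq : List String) (pid : String) (ns bps : Int)
    (acc : List (String × Int × Int × String)) :
    (pvA_sessions (ns + 1 - 1).toNat 1 bps (seq.length : Int) seq pid 0 acc).1
    = acc ++ (PySem.List.pyRange 0 (min (seq.length : Int) (max 0 ns * max 0 bps)) 1).map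
        (fun b => (pid, PySem.Int.floordiv b bps + 1, b + 1, (PySem.List.pyGet? seq b).getD "")) := by
  have hfuel : (ns + 1 - 1).toNat = ns.toNat := by omega
  have hs := pv_sessions_eq seq pid bps ns.toNat 1 acc le_rfl (by simp)
  simp only [show (1 : Nat) - 1 = 0 from rfl, Nat.zero_mul, Nat.zero_add, Nat.sub_zero,
    Nat.cast_zero, Nat.cast_one] at hs
  rw [hfuel, hs]
  dsimp only
  congr 1
  -- the Int limit is the cast of the Nat limit
  have hlim : min (seq.length : Int) (max 0 ns * max 0 bps)
      = ((min (ns.toNat * bps.toNat) seq.length : Nat) : Int) := by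
    have h1 : max 0 ns = (ns.toNat : Int) := by omega
    have h2 : max 0 bps = (bps.toNat : Int) := by omega
    rw [h1, h2, Nat.cast_min, ← Nat.cast_mul, min_comm]
  rw [hlim, PySem.List.pyRange_zero_nat, List.map_map, List.range_eq_range']
  apply List.map_congr_left
  intro k hk
  simp only [Function.comp_apply]
  have hk' : k < min (ns.toNat * bps.toNat) seq.length := by
    have := List.mem_range'_1.mp hk; omega
  have hbpos : 0 < bps.toNat := by
    rcases Nat.eq_zero_or_pos bps.toNat with h | h
    · rw [h] at hk'; omega
    · exact h
  have hdiv : PySem.Int.floordiv (k : Int) bps = ((k / bps.toNat : Nat) : Int) := by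
    rw [PySem.Int.floordiv_eq_ediv_of_pos (by omega : (0:Int) < bps)]
    rw [Int.natCast_ediv]
    congr 1
    omega
  simp [hdiv, List.getD_eq_getElem?_getD]

-- with blocks_per_session = None every participant computes the same value (total is always 8),
-- so B may recompute it where A caches it in the mutable local
lemma pv_body_bps (ns q : Int) :
    pvB_body ns none q
    = pvB_body ns (some (PySem.Int.floordiv 8 ns + (if PySem.Int.mod 8 ns ≠ 0 then 1 else 0))) q := by
  unfold pvB_body
  simp only [PySem.List.len_eq, pv_seqlen]
  norm_num

-- whole participant loop: n remaining participants starting at index p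
lemma pv_loop_eq (n : Nat) (p : Int) (ns : Int) (bpso : Option Int)
    (data : List (String × Int × Int × String)) (h : bpso = none → ns ≠ 0) :
    pvA_participants n p ns bpso data
    = data ++ ((List.range n).map (fun (k : Nat) => p + (k : Int))).flatMap (pvB_body ns bpso) := by
  induction n generalizing p bpso data with
  | zero => simp [pvA_participants]
  | succ n ih =>
    have hlen8 : PySem.List.len (get_sequence_for_participant p) = (8 : Int) := by
      rw [PySem.List.len_eq, pv_seqlen]; norm_num
    rw [pvA_participants.eq_def]
    dsimp only
    simp only [hlen8]
    rw [show (8 : Int) = ((get_sequence_for_participant p).length : Int) from by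
      rw [pv_seqlen]; norm_num]
    rw [pv_part_eq]
    have hrange : (List.range (n + 1)).map (fun (k : Nat) => p + (k : Int))
        = p :: (List.range n).map (fun (k : Nat) => (p + 1) + (k : Int)) := by
      rw [List.range_succ_eq_map, List.map_cons, List.map_map]
      simp only [Nat.cast_zero, add_zero]
      congr 1
      apply List.map_congr_left
      intro k _
      simp only [Function.comp_apply]
      push_cast
      ring
    rw [hrange, List.flatMap_cons]
    cases bpso with
    | some b =>
      rw [ih (p + 1) (some b) _ (by simp)]
      rw [← List.append_assoc]
      congr 2
    | none =>
      rw [ih (p + 1) (some _) _ (by simp)]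
      rw [← List.append_assoc]
      congr 2
      · funext q
        rw [pv_body_bps]
        congr 2
        simp [pv_seqlen]

-- ===== VERDICT (by name: the statement is the Claim_ definition above) =====
theorem generate_tracking_data_spec : Claim_equal_generate_tracking_data := by
  intro np ns bpso _ hpre
  unfold Spec_generate_tracking_data generate_tracking_data generate_tracking_data_alt
  by_cases hnp : np ≤ 0
  · have h0 : np.toNat = 0 := by omega
    rw [h0, PySem.List.pyRange_one_eq_nil (by omega : np ≤ 0)]
    simp [pvA_participants]
  · have hns : bpso = none → ns ≠ 0 := by
      intro h
      rcases hpre with h1 | h2 | h3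
      · omega
      · exact absurd h h2
      · exact h3
    rw [pv_loop_eq np.toNat 0 ns bpso [] hns, PySem.List.pyRange_one]
    simp
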